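-- pv_equiv track=rewrite | github.com/anikolaienko/algorithms-py | jobs.py | solution
-- ===== SOURCE A (Python) =====
-- import typing
--
-- class Job:
--     def __init__(self, arr):
--         self.start = arr[0]
--         self.end = arr[1]
--         self.load = arr[2]
--
-- def solution(jobValues: typing.List[typing.List[int]]) -> int:
--     if any(len(job) != 3 or any(x < 0 for x in job) or job[0] > job[1] for job in jobValues):
--         return -1
--     jobs = list(map(Job, (j for j in jobValues)))
--
--     timeline_size = max(job.end for job in jobs) + 1
--     cpu_timeline = [0] * timeline_size
--     for job in jobs:
--         for i in range(job.start, job.end + 1):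
--             cpu_timeline[i] += job.load
--
--     return max(cpu_timeline)
-- ===== SOURCE B (Python) =====
-- def solution(jobValues):
--     if any(len(j) != 3 or j[0] < 0 or j[1] < 0 or j[2] < 0 or j[0] > j[1]
--            for j in jobValues):
--         return -1
--     best = 0
--     for s, _e, _l in jobValues:
--         cur = sum(l2 for s2, e2, l2 in jobValues if s2 <= s <= e2)
--         if cur > best:
--             best = cur
--     return best
-- ===== Notes on version B (the rewrite author's own statement) =====
-- stated objective: alternative
-- what changed: B drops A's per-time-unit timeline array and instead sums the overlapping loads only at each job's start time, where the maximum concurrent load is always attained; cost is O(n^2) in the number of jobs instead of O(n*maxEnd) in the coordinate range.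
import Mathlib
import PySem

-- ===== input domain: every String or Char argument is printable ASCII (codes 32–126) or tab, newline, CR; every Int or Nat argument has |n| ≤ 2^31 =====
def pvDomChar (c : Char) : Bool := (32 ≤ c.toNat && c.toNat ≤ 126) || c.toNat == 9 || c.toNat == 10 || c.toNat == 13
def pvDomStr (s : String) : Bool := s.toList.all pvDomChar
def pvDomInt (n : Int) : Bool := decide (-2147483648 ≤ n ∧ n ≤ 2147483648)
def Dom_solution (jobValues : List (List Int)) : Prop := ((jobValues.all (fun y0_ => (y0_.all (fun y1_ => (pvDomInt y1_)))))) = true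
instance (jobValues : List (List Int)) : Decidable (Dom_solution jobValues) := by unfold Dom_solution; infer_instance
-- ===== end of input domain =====

-- B replaces A's per-time-unit timeline with a per-job scan that evaluates the total load
-- only at each job's start time (where the maximum is always attained); no timeline array.
-- Pre_ excludes only the empty list, on which A raises ValueError (max() of an empty sequence).

-- ===== PORT A =====
-- Python: len(job) != 3 or any(x < 0 for x in job) or job[0] > job[1]
-- (job[0]/job[1] are reached only when len == 3, so getD is exact there)
def pvInvalidA (job : List Int) : Bool :=
  decide (job.length ≠ 3) || job.any (fun x => decide (x < 0)) ||
    decide (job.getD 0 0 > job.getD 1 0)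

def solution (jobValues : List (List Int)) : Int :=
  if jobValues.any pvInvalidA then -1
  else
    match PySem.List.max? (jobValues.map (fun j => j.getD 1 0)) (fun x => x) with
    | none => 0  -- Python raises ValueError here (empty jobValues); excluded by Pre_solution
    | some m =>
      let tl0 : List Int := List.replicate (m + 1).toNat 0
      -- cpu_timeline[i] += job.load for i in range(job.start, job.end + 1);
      -- indices are nonneg and in range for every valid job, so set/getD are exact
      let tl := jobValues.foldl (fun t job =>
        (PySem.List.pyRange (job.getD 0 0) (job.getD 1 0 + 1) 1).foldl
          (fun u i => u.set i.toNat (u.getD i.toNat 0 + job.getD 2 0)) t) tl0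
      (PySem.List.max? tl (fun x => x)).getD 0

-- ===== PORT B =====
def pvBadB (j : List Int) : Bool :=
  decide (j.length ≠ 3) || decide (j.getD 0 0 < 0) || decide (j.getD 1 0 < 0) ||
    decide (j.getD 2 0 < 0) || decide (j.getD 0 0 > j.getD 1 0)

-- sum(l2 for s2, e2, l2 in jobValues if s2 <= t <= e2)
def pvCoverSum (jobValues : List (List Int)) (t : Int) : Int :=
  jobValues.foldl (fun acc j =>
    if j.getD 0 0 ≤ t ∧ t ≤ j.getD 1 0 then acc + j.getD 2 0 else acc) 0

def solution_alt (jobValues : List (List Int)) : Int :=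
  if jobValues.any pvBadB then -1
  else jobValues.foldl (fun best j =>
    let cur := pvCoverSum jobValues (j.getD 0 0)
    if cur > best then cur else best) 0

-- ===== PRECONDITION & SPEC =====
-- Pre_ excludes only the empty list, on which A raises ValueError (max() of an empty sequence).
def Pre_solution (jobValues : List (List Int)) : Prop := jobValues ≠ []
instance (jobValues : List (List Int)) : Decidable (Pre_solution jobValues) := by unfold Pre_solution; infer_instance
def pvWitness_solution : List (List Int) := [[0, 2, 5], [1, 3, 4]]

def Spec_solution (jobValues : List (List Int)) (out : Int) : Prop := out = solution_alt jobValues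
instance (jobValues : List (List Int)) (out : Int) : Decidable (Spec_solution jobValues out) := by unfold Spec_solution; infer_instance

-- ===== CLAIM (what is proved, stated in full; the proofs are below) =====
def Claim_equal_solution : Prop := ∀ (jobValues : List (List Int)), Dom_solution jobValues → Pre_solution jobValues → Spec_solution jobValues (solution jobValues)

-- ===== LEMMAS AND PROOFS =====

-- the two validity tests agree on every job
theorem invalid_eq_bad (j : List Int) : pvInvalidA j = pvBadB j := by
  rcases j with _ | ⟨a, _ | ⟨b, _ | ⟨c, _ | ⟨d, t⟩⟩⟩⟩ <;>
    (rw [Bool.eq_iff_iff]; simp [pvInvalidA, pvBadB, List.any_cons]; try omega)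

-- pvCoverSum with a shifted accumulator
theorem coverSum_acc (jobs : List (List Int)) (t a : Int) :
    jobs.foldl (fun acc j =>
      if j.getD 0 0 ≤ t ∧ t ≤ j.getD 1 0 then acc + j.getD 2 0 else acc) a
    = a + pvCoverSum jobs t := by
  induction jobs generalizing a with
  | nil => simp [pvCoverSum]
  | cons j rest ih =>
    simp only [pvCoverSum, List.foldl_cons]
    rw [ih, ih]
    split_ifs <;> ring

theorem coverSum_cons (j : List Int) (jobs : List (List Int)) (t : Int) :
    pvCoverSum (j :: jobs) t
    = (if j.getD 0 0 ≤ t ∧ t ≤ j.getD 1 0 then j.getD 2 0 else 0) + pvCoverSum jobs t := by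
  simp only [pvCoverSum, List.foldl_cons]
  rw [coverSum_acc]
  split_ifs <;> simp [pvCoverSum]

theorem coverSum_nonneg (jobs : List (List Int)) (t : Int)
    (h : ∀ j ∈ jobs, 0 ≤ j.getD 2 0) : 0 ≤ pvCoverSum jobs t := by
  induction jobs with
  | nil => simp [pvCoverSum]
  | cons j rest ih =>
    rw [coverSum_cons]
    have h1 := h j (by simp)
    have h2 := ih (fun j hj => h j (by simp [hj]))
    split_ifs <;> omega

theorem coverSum_mono (jobs : List (List Int)) (t s : Int)
    (hl : ∀ j ∈ jobs, 0 ≤ j.getD 2 0)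
    (h : ∀ j ∈ jobs, j.getD 0 0 ≤ t ∧ t ≤ j.getD 1 0 → j.getD 0 0 ≤ s ∧ s ≤ j.getD 1 0) :
    pvCoverSum jobs t ≤ pvCoverSum jobs s := by
  induction jobs with
  | nil => simp [pvCoverSum]
  | cons j rest ih =>
    rw [coverSum_cons, coverSum_cons]
    have h1 := h j (by simp)
    have h2 := hl j (by simp)
    have h3 := ih (fun j hj => hl j (by simp [hj])) (fun j hj => h j (by simp [hj]))
    split_ifs <;> omega

theorem coverSum_zero (jobs : List (List Int)) (t : Int)
    (h : ∀ j ∈ jobs, ¬ (j.getD 0 0 ≤ t ∧ t ≤ j.getD 1 0)) : pvCoverSum jobs t = 0 := by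
  induction jobs with
  | nil => simp [pvCoverSum]
  | cons j rest ih =>
    rw [coverSum_cons]
    have h1 := h j (by simp)
    have h2 := ih (fun j hj => h j (by simp [hj]))
    split_ifs <;> omega

-- among the jobs covering t there is one with maximal start
theorem exists_max_start (jobs : List (List Int)) (t : Int)
    (h : ∃ j ∈ jobs, j.getD 0 0 ≤ t ∧ t ≤ j.getD 1 0) :
    ∃ j0 ∈ jobs, (j0.getD 0 0 ≤ t ∧ t ≤ j0.getD 1 0) ∧
      ∀ j ∈ jobs, (j.getD 0 0 ≤ t ∧ t ≤ j.getD 1 0) → j.getD 0 0 ≤ j0.getD 0 0 := by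
  induction jobs with
  | nil => simp at h
  | cons j rest ih =>
    by_cases hex : ∃ j' ∈ rest, j'.getD 0 0 ≤ t ∧ t ≤ j'.getD 1 0
    · obtain ⟨j0, hj0m, hj0c, hj0max⟩ := ih hex
      by_cases hj : (j.getD 0 0 ≤ t ∧ t ≤ j.getD 1 0) ∧ j0.getD 0 0 ≤ j.getD 0 0
      · exact ⟨j, by simp, hj.1, by
          intro j' hj' hc'
          rcases List.mem_cons.mp hj' with rfl | hm
          · omega
          · have := hj0max j' hm hc'; omega⟩
      · refine ⟨j0, by simp [hj0m], hj0c, ?_⟩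
        intro j' hj' hc'
        rcases List.mem_cons.mp hj' with rfl | hm
        · by_contra hlt
          exact hj ⟨hc', by omega⟩
        · exact hj0max j' hm hc'
    · obtain ⟨j', hj'm, hj'c⟩ := h
      rcases List.mem_cons.mp hj'm with rfl | hm
      · refine ⟨j', by simp, hj'c, ?_⟩
        intro j2 hj2 hc2
        rcases List.mem_cons.mp hj2 with rfl | hm2
        · omega
        · exact absurd ⟨j2, hm2, hc2⟩ hex
      · exact absurd ⟨j', hm, hj'c⟩ hex

-- inner loop of A: adding c over the index range [a, b]
theorem inner_loop (c : Int) : ∀ (n : Nat) (a b : Int) (t : List Int), 0 ≤ a →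
    b < (t.length : Int) → n = (b + 1 - a).toNat →
    (((PySem.List.pyRange a (b + 1) 1).foldl
        (fun u i => u.set i.toNat (u.getD i.toNat 0 + c)) t).length = t.length ∧
     ∀ k : Nat, ((PySem.List.pyRange a (b + 1) 1).foldl
        (fun u i => u.set i.toNat (u.getD i.toNat 0 + c)) t).getD k 0
        = t.getD k 0 + if a ≤ (k : Int) ∧ (k : Int) ≤ b then c else 0) := by
  intro n
  induction n with
  | zero =>
    intro a b t ha hb hn
    rw [PySem.List.pyRange_one_eq_nil (by omega)]
    refine ⟨rfl, fun k => ?_⟩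
    have hno : ¬ (a ≤ (k : Int) ∧ (k : Int) ≤ b) := by omega
    simp [hno]
  | succ n ih =>
    intro a b t ha hb hn
    rw [PySem.List.pyRange_one_cons (by omega)]
    simp only [List.foldl_cons]
    have hlen : (t.set a.toNat (t.getD a.toNat 0 + c)).length = t.length := by simp
    obtain ⟨ih1, ih2⟩ := ih (a + 1) b (t.set a.toNat (t.getD a.toNat 0 + c))
      (by omega) (by rw [hlen]; exact hb) (by omega)
    refine ⟨by rw [ih1, hlen], fun k => ?_⟩
    rw [ih2 k]
    by_cases hk : a.toNat = k
    · have hk' : (k : Int) = a := by omega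
      have hmem : a.toNat < t.length := by omega
      have hset : (t.set a.toNat (t.getD a.toNat 0 + c)).getD k 0 = t.getD a.toNat 0 + c := by
        subst hk; simp [List.getD_eq_getElem?_getD, hmem]
      rw [hset, hk]
      split_ifs <;> omega
    · have hset : (t.set a.toNat (t.getD a.toNat 0 + c)).getD k 0 = t.getD k 0 := by
        simp [List.getD_eq_getElem?_getD, List.getElem?_set_ne hk]
      rw [hset]
      have hiff : (a ≤ (k : Int) ∧ (k : Int) ≤ b) ↔ (a + 1 ≤ (k : Int) ∧ (k : Int) ≤ b) := by omega
      split_ifs with hA hB hB <;> omega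

-- outer loop of A: the timeline accumulates pvCoverSum
theorem outer_loop : ∀ (jobs : List (List Int)) (tl : List Int),
    (∀ j ∈ jobs, 0 ≤ j.getD 0 0 ∧ j.getD 0 0 ≤ j.getD 1 0 ∧ j.getD 1 0 < (tl.length : Int)) →
    ((jobs.foldl (fun t job =>
        (PySem.List.pyRange (job.getD 0 0) (job.getD 1 0 + 1) 1).foldl
          (fun u i => u.set i.toNat (u.getD i.toNat 0 + job.getD 2 0)) t) tl).length = tl.length ∧
     ∀ k : Nat, (jobs.foldl (fun t job =>
        (PySem.List.pyRange (job.getD 0 0) (job.getD 1 0 + 1) 1).foldl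
          (fun u i => u.set i.toNat (u.getD i.toNat 0 + job.getD 2 0)) t) tl).getD k 0
        = tl.getD k 0 + pvCoverSum jobs (k : Int)) := by
  intro jobs
  induction jobs with
  | nil => exact fun tl h => ⟨rfl, fun k => by simp [pvCoverSum]⟩
  | cons j rest ih =>
    intro tl h
    simp only [List.foldl_cons]
    have hj := h j (by simp)
    obtain ⟨i1, i2⟩ := inner_loop (j.getD 2 0) (j.getD 1 0 + 1 - j.getD 0 0).toNat
      (j.getD 0 0) (j.getD 1 0) tl hj.1 hj.2.2 rfl
    obtain ⟨o1, o2⟩ := ih ((PySem.List.pyRange (j.getD 0 0) (j.getD 1 0 + 1) 1).foldl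
        (fun u i => u.set i.toNat (u.getD i.toNat 0 + j.getD 2 0)) tl)
      (fun j' hj' => by rw [i1]; exact h j' (by simp [hj']))
    refine ⟨by rw [o1, i1], fun k => ?_⟩
    rw [o2 k, i2 k, coverSum_cons]
    ring

-- B's running-max loop
theorem best_loop (jv : List (List Int)) : ∀ (jobs : List (List Int)) (b : Int),
    (b ≤ jobs.foldl (fun best j =>
        let cur := pvCoverSum jv (j.getD 0 0)
        if cur > best then cur else best) b) ∧
    (∀ j ∈ jobs, pvCoverSum jv (j.getD 0 0) ≤ jobs.foldl (fun best j =>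
        let cur := pvCoverSum jv (j.getD 0 0)
        if cur > best then cur else best) b) ∧
    (jobs.foldl (fun best j =>
        let cur := pvCoverSum jv (j.getD 0 0)
        if cur > best then cur else best) b = b ∨
      ∃ j ∈ jobs, jobs.foldl (fun best j =>
        let cur := pvCoverSum jv (j.getD 0 0)
        if cur > best then cur else best) b = pvCoverSum jv (j.getD 0 0)) := by
  intro jobs
  induction jobs with
  | nil => exact fun b => ⟨le_refl b, by simp, Or.inl rfl⟩
  | cons j rest ih =>
    intro b
    simp only [List.foldl_cons]
    obtain ⟨ih1, ih2, ih3⟩ := ih (if pvCoverSum jv (j.getD 0 0) > b then pvCoverSum jv (j.getD 0 0) else b)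
    refine ⟨le_trans (by split_ifs <;> omega) ih1, fun j' hj' => ?_, ?_⟩
    · rcases List.mem_cons.mp hj' with rfl | hm
      · exact le_trans (by split_ifs <;> omega) ih1
      · exact ih2 j' hm
    · rcases ih3 with heq | ⟨j', hm, he⟩
      · by_cases hc : pvCoverSum jv (j.getD 0 0) > b
        · exact Or.inr ⟨j, by simp, by rw [heq, if_pos hc]⟩
        · exact Or.inl (by rw [heq, if_neg hc])
      · exact Or.inr ⟨j', by simp [hm], he⟩

-- ===== VERDICT (by name: the statement is the Claim_ definition above) =====
theorem solution_spec : Claim_equal_solution := by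
  unfold Claim_equal_solution
  intro jv _ hpre
  unfold Spec_solution solution solution_alt
  rw [show pvInvalidA = pvBadB from funext invalid_eq_bad]
  by_cases hbad : jv.any pvBadB
  · simp [hbad]
  · rw [if_neg hbad, if_neg hbad]
    have hok : ∀ j ∈ jv, 0 ≤ j.getD 0 0 ∧ j.getD 0 0 ≤ j.getD 1 0 ∧ 0 ≤ j.getD 2 0 := by
      intro j hj
      have : pvBadB j = false := by
        by_contra hb
        exact hbad (List.any_eq_true.mpr ⟨j, hj, by simpa using hb⟩)
      simp only [pvBadB, Bool.or_eq_false_iff, decide_eq_false_iff_not, not_lt, not_le] at this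
      omega
    obtain ⟨j₁, hj₁⟩ : ∃ j, j ∈ jv := by
      cases jv with
      | nil => exact absurd rfl hpre
      | cons a t => exact ⟨a, by simp⟩
    have hmapne : jv.map (fun j => j.getD 1 0) ≠ [] := by
      simpa using hpre
    obtain ⟨m, hm⟩ : ∃ m, PySem.List.max? (jv.map (fun j => j.getD 1 0)) (fun x => x) = some m := by
      cases hmx : PySem.List.max? (jv.map (fun j => j.getD 1 0)) (fun x => x) with
      | none => exact absurd ((PySem.List.max?_eq_none_iff _ _).mp hmx) hmapne
      | some m => exact ⟨m, rfl⟩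
    have hmmem := PySem.List.max?_mem hm
    obtain ⟨jm, hjmm, hjme⟩ := List.mem_map.mp hmmem
    have hmax : ∀ j ∈ jv, j.getD 1 0 ≤ m := by
      intro j hj
      exact PySem.List.max?_isMax hm _ (List.mem_map.mpr ⟨j, hj, rfl⟩)
    have hm0 : 0 ≤ m := by
      have := hok jm hjmm
      omega
    rw [hm]
    simp only
    have hlen0 : (List.replicate (m + 1).toNat (0 : Int)).length = (m + 1).toNat := by simp
    obtain ⟨olen, oget⟩ := outer_loop jv (List.replicate (m + 1).toNat (0 : Int))
      (fun j hj => by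
        have h1 := hok j hj
        have h2 := hmax j hj
        rw [hlen0]
        omega)
    set tl := jv.foldl (fun t job =>
        (PySem.List.pyRange (job.getD 0 0) (job.getD 1 0 + 1) 1).foldl
          (fun u i => u.set i.toNat (u.getD i.toNat 0 + job.getD 2 0)) t)
        (List.replicate (m + 1).toNat (0 : Int)) with htl
    have hget : ∀ k : Nat, tl.getD k 0 = pvCoverSum jv (k : Int) := by
      intro k
      rw [oget k]
      have : (List.replicate (m + 1).toNat (0 : Int)).getD k 0 = 0 := by
        simp [List.getD_eq_getElem?_getD, List.getElem?_replicate]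
        split <;> rfl
      rw [this, zero_add]
    have htlen : tl.length = (m + 1).toNat := by rw [olen, hlen0]
    have htlne : tl ≠ [] := by
      intro hnil
      rw [hnil] at htlen
      simp at htlen
      omega
    obtain ⟨v, hv⟩ : ∃ v, PySem.List.max? tl (fun x => x) = some v := by
      cases hmx : PySem.List.max? tl (fun x => x) with
      | none => exact absurd ((PySem.List.max?_eq_none_iff _ _).mp hmx) htlne
      | some v => exact ⟨v, rfl⟩
    rw [hv]
    simp only [Option.getD_some]
    have hloads : ∀ j ∈ jv, 0 ≤ j.getD 2 0 := fun j hj => (hok j hj).2.2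
    obtain ⟨b1, b2, b3⟩ := best_loop jv jv 0
    -- every timeline value is at most B's best
    have hub : ∀ k : Nat, pvCoverSum jv (k : Int) ≤ jv.foldl (fun best j =>
        let cur := pvCoverSum jv (j.getD 0 0)
        if cur > best then cur else best) 0 := by
      intro k
      by_cases hcov : ∃ j ∈ jv, j.getD 0 0 ≤ (k : Int) ∧ (k : Int) ≤ j.getD 1 0
      · obtain ⟨j0, hj0m, hj0c, hj0max⟩ := exists_max_start jv (k : Int) hcov
        have hmono : pvCoverSum jv (k : Int) ≤ pvCoverSum jv (j0.getD 0 0) := by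
          apply coverSum_mono jv _ _ hloads
          intro j hj hc
          exact ⟨hj0max j hj hc, le_trans hj0c.1 hc.2⟩
        exact le_trans hmono (b2 j0 hj0m)
      · push_neg at hcov
        rw [coverSum_zero jv _ (fun j hj hc => by have := hcov j hj hc.1; omega)]
        exact b1
    -- v is some timeline value
    obtain ⟨kv, hkv, hkveq⟩ := List.mem_iff_getElem.mp (PySem.List.max?_mem hv)
    have hveq : v = pvCoverSum jv (kv : Int) := by
      rw [← hkveq, ← List.getD_eq_getElem tl 0 hkv, hget]
    have hle : v ≤ jv.foldl (fun best j =>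
        let cur := pvCoverSum jv (j.getD 0 0)
        if cur > best then cur else best) 0 := by
      rw [hveq]; exact hub kv
    have hge : jv.foldl (fun best j =>
        let cur := pvCoverSum jv (j.getD 0 0)
        if cur > best then cur else best) 0 ≤ v := by
      rcases b3 with heq | ⟨j, hjm, hje⟩
      · rw [heq, hveq]
        exact coverSum_nonneg jv _ hloads
      · rw [hje]
        have hj := hok j hjm
        have hjmax := hmax j hjm
        have hklt : (j.getD 0 0).toNat < tl.length := by
          rw [htlen]; omega
        have hcast : (((j.getD 0 0).toNat : Nat) : Int) = j.getD 0 0 := by omega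
        have := PySem.List.max?_isMax hv (tl[(j.getD 0 0).toNat]'hklt) (by
          exact List.getElem_mem hklt)
        simp only at this
        rw [← List.getD_eq_getElem tl 0 hklt, hget, hcast] at this
        exact this
    exact le_antisymm hle hge
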